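-- pv_equiv track=rewrite | github.com/mohamedzaki999/student3 | app.py | duplicated_logic_one
-- ===== SOURCE A (Python) =====
-- def duplicated_logic_one(value):
--     if value is None:
--         return 0
--     if value == "":
--         return 0
--     total = 0
--     for i in range(100):
--         total = total + i
--     if value == "vip":
--         total = total + 100
--     return total
-- ===== SOURCE B (Python) =====
-- BONUS = {"vip": 100}
--
-- def duplicated_logic_one(value):
--     v = value if value is not None else ""
--     if v == "":
--         return 0
--     return 4950 + BONUS.get(v, 0)
-- ===== Notes on version B (the rewrite author's own statement) =====
-- stated objective: simpler
-- what changed: Removes the 100-iteration accumulation loop and the cascaded guards: B normalises None to "", returns 0 on empty, and otherwise returns the constant 4950 plus a bonus looked up in a bonus table instead of a branch.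
import Mathlib
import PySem

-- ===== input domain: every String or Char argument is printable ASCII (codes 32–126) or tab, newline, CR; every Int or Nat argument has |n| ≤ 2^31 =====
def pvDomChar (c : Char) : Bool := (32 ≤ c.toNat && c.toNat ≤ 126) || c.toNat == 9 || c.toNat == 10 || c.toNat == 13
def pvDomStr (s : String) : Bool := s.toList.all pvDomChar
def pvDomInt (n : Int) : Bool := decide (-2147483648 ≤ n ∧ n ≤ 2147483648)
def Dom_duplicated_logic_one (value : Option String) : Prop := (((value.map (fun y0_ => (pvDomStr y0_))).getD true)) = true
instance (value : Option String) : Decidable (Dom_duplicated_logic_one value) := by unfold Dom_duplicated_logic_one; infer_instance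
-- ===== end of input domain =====

-- ===== PORT A =====
-- literal port: None/"" guards, then total accumulated over range(100), then vip bonus
def duplicated_logic_one (value : Option String) : Int :=
  match value with
  | none => 0
  | some v =>
    if v = "" then 0
    else
      let total : Int := (PySem.List.pyRange 0 100 1).foldl (fun total i => total + i) 0
      let total := if v = "vip" then total + 100 else total
      total

-- ===== PORT B =====
-- B: normalise None to "", single empty guard, constant 4950 plus table lookup for the bonus
def pvBonus : PySem.Dict String Int := PySem.Dict.mk [("vip", 100)]

def duplicated_logic_one_alt (value : Option String) : Int :=
  let v := value.getD ""
  if v = "" then 0 else 4950 + pvBonus.getD v 0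

-- ===== PRECONDITION & SPEC =====
def Spec_duplicated_logic_one (value : Option String) (out : Int) : Prop := out = duplicated_logic_one_alt value
instance (value : Option String) (out : Int) : Decidable (Spec_duplicated_logic_one value out) := by unfold Spec_duplicated_logic_one; infer_instance

-- ===== CLAIM =====
def Claim_equal_duplicated_logic_one : Prop := ∀ (value : Option String), Dom_duplicated_logic_one value → Spec_duplicated_logic_one value (duplicated_logic_one value)

-- ===== LEMMAS AND PROOFS =====
set_option maxRecDepth 4000 in
theorem loop_value :
    (PySem.List.pyRange 0 100 1).foldl (fun total i => total + i) (0 : Int) = 4950 := by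
  decide

theorem bonus_getD (v : String) : pvBonus.getD v 0 = if v = "vip" then 100 else 0 := by
  by_cases h : v = "vip"
  · simp [pvBonus, PySem.Dict.getD_eq_get?_getD, PySem.Dict.get?_mk_cons, h]
  · simp [pvBonus, PySem.Dict.getD_eq_get?_getD, PySem.Dict.get?_mk_cons, h,
      PySem.Dict.get?, Ne.symm h]

-- ===== VERDICT =====
theorem duplicated_logic_one_spec : Claim_equal_duplicated_logic_one := by
  intro value _
  unfold Spec_duplicated_logic_one duplicated_logic_one duplicated_logic_one_alt
  cases value with
  | none => rfl
  | some v =>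
    by_cases h : v = "" <;> simp [h, loop_value, bonus_getD]
    by_cases hv : v = "vip" <;> simp [hv]
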